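-- pv_equiv track=rewrite | github.com/GG4GG4/ggaggalang | ggaggalang/extensions.py | scan_for_if_blocks
-- ===== SOURCE A (Python) =====
-- from typing import Dict, List, Tuple, Optional, Any
--
-- def scan_for_if_blocks(commands: List[str]) -> Dict[int, Tuple[int, int]]:
--     """
--     코드에서 if 블록 찾기
--
--     Args:
--         commands: 명령어 목록
--
--     Returns:
--         if 블록 테이블 (시작 -> 끝 매핑)
--     """
--     if_blocks: Dict[int, int] = {}  # if 시작 -> else 또는 if_end
--     else_blocks: Dict[int, int] = {}  # else -> if_end
--     if_stack: List[int] = []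
--
--     for i, cmd in enumerate(commands):
--         if cmd == 'IF_START':  # if 시작
--             if_stack.append(i)
--         elif cmd == 'IF_ELSE':  # else
--             if if_stack:
--                 if_start = if_stack[-1]
--                 if_blocks[if_start] = i
--         elif cmd == 'IF_END':  # if/else 종료
--             if if_stack:
--                 if_start = if_stack.pop()
--                 if if_start in if_blocks:  # else가 있는 경우
--                     else_pos = if_blocks[if_start]
--                     else_blocks[else_pos] = i
--                 else:  # else가 없는 경우
--                     if_blocks[if_start] = i
--
--     # if, else, end 포인트 모두 결합
--     result = {}
--     for if_start, next_point in if_blocks.items():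
--         if next_point in else_blocks:
--             result[if_start] = (next_point, else_blocks[next_point])
--         else:
--             result[if_start] = (next_point, next_point)
--
--     return result
-- ===== SOURCE B (Python) =====
-- from typing import Dict, List, Tuple
--
--
-- def scan_for_if_blocks(commands: List[str]) -> Dict[int, Tuple[int, int]]:
--     """Recursive-descent parse of the IF structure.
--
--     Each block's table entry is emitted between the entries of blocks nested
--     in its then-branch and those nested in its else-branch, so concatenation
--     yields the whole table in one ordered list; a block whose IF_END is
--     missing gets no entry.
--     """
--     n = len(commands)
--
--     def block(start: int, j: int):
--         """Parse the body of the block opened at `start` from position j.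
--         Return (entries for this block and everything nested in it,
--         position just after the block)."""
--         pre, post = [], []           # entries from the then-part / else-part
--         else_pos = None
--         while j < n:
--             cmd = commands[j]
--             if cmd == 'IF_START':
--                 sub, j = block(j, j + 1)
--                 (post if else_pos is not None else pre).extend(sub)
--             elif cmd == 'IF_ELSE':
--                 else_pos = j
--                 j += 1
--             elif cmd == 'IF_END':
--                 nxt = j if else_pos is None else else_pos
--                 return pre + [(start, (nxt, j))] + post, j + 1
--             else:
--                 j += 1
--         return pre + post, n         # unclosed block: no entry for it
--
--     entries, j = [], 0
--     while j < n:
--         if commands[j] == 'IF_START':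
--             sub, j = block(j, j + 1)
--             entries.extend(sub)
--         else:
--             j += 1
--     return dict(entries)
-- ===== Notes on version B (the rewrite author's own statement) =====
-- stated objective: alternative
-- what changed: B replaces A's dict-and-stack scan plus final merge pass with a recursive-descent parser: each block's recursive call returns its subtree's table entries split around its own entry (then-part nested blocks, the entry, else-part nested blocks), so plain concatenation yields the whole table in A's order with no if_blocks/else_blocks dicts and no merge loop.
-- intended difference: On inputs with a dangling else (an IF_ELSE inside a block whose IF_END is missing) A returns a table entry mapping the unterminated block to its else position twice, e.g. {0: (1, 1)} for ['IF_START', 'IF_ELSE'], while B returns no entry for a block that never closes, which is the intended reading of a start->(else,end) table. — e.g. on scan_for_if_blocks(["IF_START", "IF_ELSE"]): A returns [(0, 1, 1)], B returns []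
import Mathlib
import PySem

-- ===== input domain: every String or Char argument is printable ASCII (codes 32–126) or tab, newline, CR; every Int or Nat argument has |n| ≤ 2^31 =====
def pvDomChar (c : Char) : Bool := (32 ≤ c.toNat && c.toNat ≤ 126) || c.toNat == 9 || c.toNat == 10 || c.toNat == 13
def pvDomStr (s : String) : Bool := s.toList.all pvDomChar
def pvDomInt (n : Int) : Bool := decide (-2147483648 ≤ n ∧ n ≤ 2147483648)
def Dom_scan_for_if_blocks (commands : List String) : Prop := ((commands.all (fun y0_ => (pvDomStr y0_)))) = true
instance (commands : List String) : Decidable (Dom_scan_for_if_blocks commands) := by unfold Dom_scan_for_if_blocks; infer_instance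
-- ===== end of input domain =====

-- B re-implements the scan as a recursive-descent parser: each block's table entry is
-- emitted between the entries of the blocks nested in its then-part and those in its
-- else-part, so plain concatenation produces the whole table in A's order, with no
-- auxiliary dicts, no explicit stack and no final merge pass (objective: alternative).
-- On "dangling else" inputs (an IF_ELSE whose block never reaches its IF_END) the two
-- intentionally differ; see D_scan_for_if_blocks below.

-- ===== PORT A =====
-- state: (if_blocks, else_blocks, if_stack); Python stacks are modelled top-first.
def scanAStep (st : PySem.Dict Int Int × PySem.Dict Int Int × List Int)
    (p : Int × String) : PySem.Dict Int Int × PySem.Dict Int Int × List Int :=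
  let ib := st.1; let eb := st.2.1; let stk := st.2.2
  let i := p.1; let cmd := p.2
  if cmd = "IF_START" then (ib, eb, i :: stk)
  else if cmd = "IF_ELSE" then
    match stk with
    | [] => (ib, eb, stk)
    | s :: _ => (ib.insert s i, eb, stk)
  else if cmd = "IF_END" then
    match stk with
    | [] => (ib, eb, stk)
    | s :: rest =>
      if ib.contains s then (ib, eb.insert (ib.getD s 0) i, rest)
      else (ib.insert s i, eb, rest)
  else (ib, eb, stk)

def scan_for_if_blocks (commands : List String) : List (Int × Int × Int) :=
  let st := (PySem.List.enumerate commands).foldl scanAStep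
              (PySem.Dict.empty, PySem.Dict.empty, [])
  let ib := st.1; let eb := st.2.1
  let result := ib.items.foldl
    (fun r p => r.insert p.1 (if eb.contains p.2 then (p.2, eb.getD p.2 0) else (p.2, p.2)))
    (PySem.Dict.empty : PySem.Dict Int (Int × Int))
  result.items

-- ===== PORT B =====
-- `block start ep pre post j rest` parses the body of the block opened at `start` from
-- absolute position j, `rest` being the corresponding suffix of the command list (the
-- Python while-loop over j is ported as recursion over that suffix, exact since j only
-- moves forward). It returns ((entries, next position), remaining suffix); the subtype
-- bound on the remaining suffix only serves termination.
def blockB (start : Int) (ep : Option Int) (pre post : List (Int × Int × Int)) (j : Int) :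
    (rest : List String) →
    {p : (List (Int × Int × Int) × Int) × List String // p.2.length ≤ rest.length}
  | [] => ⟨((pre ++ post, j), []), by simp⟩
  | c :: tl =>
    if c = "IF_START" then
      match blockB j none [] [] (j + 1) tl with
      | ⟨((sub, j2), rest2), hle⟩ =>
        let pre' := if ep.isSome then pre else pre ++ sub
        let post' := if ep.isSome then post ++ sub else post
        match blockB start ep pre' post' j2 rest2 with
        | ⟨q, hle2⟩ =>
          ⟨q, by simp only [List.length_cons] at *; omega⟩
    else if c = "IF_ELSE" then
      let r := blockB start (some j) pre post (j + 1) tl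
      ⟨r.1, by have := r.2; simp only [List.length_cons] at *; omega⟩
    else if c = "IF_END" then
      ⟨((pre ++ [(start, (match ep with | some e => e | none => j), j)] ++ post, j + 1), tl),
        by simp⟩
    else
      let r := blockB start ep pre post (j + 1) tl
      ⟨r.1, by have := r.2; simp only [List.length_cons] at *; omega⟩
termination_by rest => rest.length
decreasing_by all_goals simp only [List.length_cons] at *; omega

def topB (acc : List (Int × Int × Int)) (j : Int) :
    (rest : List String) → List (Int × Int × Int)
  | [] => acc
  | c :: tl =>
    if c = "IF_START" then
      match blockB j none [] [] (j + 1) tl with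
      | ⟨((sub, j2), rest2), _hle⟩ => topB (acc ++ sub) j2 rest2
    else
      topB acc (j + 1) tl
termination_by rest => rest.length
decreasing_by all_goals simp only [List.length_cons] at *; omega

def scan_for_if_blocks_alt (commands : List String) : List (Int × Int × Int) :=
  let entries := topB [] 0 commands
  (entries.foldl (fun d p => d.insert p.1 p.2)
      (PySem.Dict.empty : PySem.Dict Int (Int × Int))).items

-- ===== PRECONDITION & SPEC =====

-- bracket depth of the command list just before position j (IF_END at depth 0 is a no-op)
def pvDepthStep (d : Int) (c : String) : Int :=
  if c = "IF_START" then d + 1 else if c = "IF_END" then max (d - 1) 0 else d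

def pvDepth (cmds : List String) (j : Nat) : Int := (cmds.take j).foldl pvDepthStep 0

def pvDanglingElseAt (cmds : List String) (j : Nat) : Bool :=
  cmds.getD j "" == "IF_ELSE" && decide (0 < pvDepth cmds j) &&
  ((List.range cmds.length).all fun k =>
    !(decide (j < k) && cmds.getD k "" == "IF_END" && pvDepth cmds k == pvDepth cmds j))

-- On inputs with a dangling else (an IF_ELSE inside a block that never reaches its
-- IF_END), A tables the unterminated block as ending at its else position, e.g.
-- {0: (1, 1)} for ['IF_START', 'IF_ELSE']; B gives no table entry for a block whose
-- IF_END is missing, which is the intended reading of "start -> (else, end)".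
def D_scan_for_if_blocks (commands : List String) : Prop :=
  ((List.range commands.length).any (pvDanglingElseAt commands)) = true
instance (commands : List String) : Decidable (D_scan_for_if_blocks commands) := by
  unfold D_scan_for_if_blocks; infer_instance

def Spec_scan_for_if_blocks (commands : List String) (out : List (Int × Int × Int)) : Prop :=
  ¬ D_scan_for_if_blocks commands → out = scan_for_if_blocks_alt commands
instance (commands : List String) (out : List (Int × Int × Int)) :
    Decidable (Spec_scan_for_if_blocks commands out) := by
  unfold Spec_scan_for_if_blocks; infer_instance

def pvDiffWitness_scan_for_if_blocks : List String := ["IF_START", "IF_ELSE"]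
def pvDiffWitnessOut_scan_for_if_blocks :
    (List (Int × Int × Int)) × (List (Int × Int × Int)) := ([(0, 1, 1)], [])

-- ===== CLAIM (what is proved, stated in full; the proofs are below) =====
def Claim_unchanged_scan_for_if_blocks : Prop := ∀ (commands : List String), Dom_scan_for_if_blocks commands → Spec_scan_for_if_blocks commands (scan_for_if_blocks commands)
def Claim_changed_scan_for_if_blocks : Prop := Dom_scan_for_if_blocks (pvDiffWitness_scan_for_if_blocks) ∧ D_scan_for_if_blocks (pvDiffWitness_scan_for_if_blocks) ∧ scan_for_if_blocks (pvDiffWitness_scan_for_if_blocks) = pvDiffWitnessOut_scan_for_if_blocks.1 ∧ scan_for_if_blocks_alt (pvDiffWitness_scan_for_if_blocks) = pvDiffWitnessOut_scan_for_if_blocks.2 ∧ pvDiffWitnessOut_scan_for_if_blocks.1 ≠ pvDiffWitnessOut_scan_for_if_blocks.2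
def Claim_exact_scan_for_if_blocks : Prop := ∀ (commands : List String), Dom_scan_for_if_blocks commands → D_scan_for_if_blocks commands → scan_for_if_blocks commands ≠ scan_for_if_blocks_alt commands

-- ===== LEMMAS AND PROOFS =====

-- The proof goes through an intermediate one-pass stack machine M (mStep): first the
-- old-style dict machinery of A is proved equal to M, then M is proved equal to the
-- recursive-descent B on inputs without a dangling else.

-- M's state: (stack of (if_start, last else position), result dict)
def mStep (st : List (Int × Option Int) × PySem.Dict Int (Int × Int))
    (p : Int × String) : List (Int × Option Int) × PySem.Dict Int (Int × Int) :=
  let stk := st.1; let res := st.2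
  let i := p.1; let cmd := p.2
  if cmd = "IF_START" then ((i, none) :: stk, res)
  else if cmd = "IF_ELSE" then
    match stk with
    | [] => (stk, res)
    | (s, _) :: rest => ((s, some i) :: rest, res.insert s (i, i))
  else if cmd = "IF_END" then
    match stk with
    | [] => (stk, res)
    | (s, o) :: rest =>
      (rest, res.insert s (match o with | some e => (e, i) | none => (i, i)))
  else (stk, res)

-- ---------- part 1 : A = M ----------

-- A's merge function applied to one next_point
def mergeF (eb : PySem.Dict Int Int) (np : Int) : Int × Int :=
  if eb.contains np then (np, eb.getD np 0) else (np, np)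

-- A's whole merge, as a value-map over if_blocks
def mapF (eb : PySem.Dict Int Int) (ib : PySem.Dict Int Int) : PySem.Dict Int (Int × Int) :=
  PySem.Dict.mk (ib.items.map (fun p => (p.1, mergeF eb p.2)))

-- The loop invariant tying A's state to M's state after processing indices < i
structure ScanInv (i : Int) (ib eb : PySem.Dict Int Int) (stkA : List Int)
    (stkB : List (Int × Option Int)) (res : PySem.Dict Int (Int × Int)) : Prop where
  stk_fst : stkB.map Prod.fst = stkA
  stk_val : ∀ p ∈ stkB, ib.get? p.1 = p.2
  res_eq : res = mapF eb ib
  ib_nodup : ib.keys.Nodup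
  stk_nodup : stkA.Nodup
  ib_keys_lt : ∀ k ∈ ib.keys, k < i
  ib_vals_lt : ∀ v ∈ ib.values, v < i
  eb_keys_lt : ∀ k ∈ eb.keys, k < i
  stk_lt : ∀ s ∈ stkA, s < i
  val_inj : ∀ p ∈ ib.items, ∀ q ∈ ib.items, p.2 = q.2 → p = q

theorem inv_init : ScanInv 0 PySem.Dict.empty PySem.Dict.empty [] [] PySem.Dict.empty := by
  constructor <;> simp [mapF, PySem.Dict.empty, PySem.Dict.keys, PySem.Dict.values, PySem.Dict.items]

theorem keys_mapF (eb ib : PySem.Dict Int Int) : (mapF eb ib).keys = ib.keys := by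
  simp [mapF, PySem.Dict.keys]

theorem contains_mapF (eb ib : PySem.Dict Int Int) (k : Int) :
    (mapF eb ib).contains k = ib.contains k := by
  have h1 := PySem.Dict.contains_eq_decide_mem_keys (mapF eb ib) k
  have h2 := PySem.Dict.contains_eq_decide_mem_keys ib k
  rw [h1, h2, keys_mapF]

theorem mapF_insert (eb ib : PySem.Dict Int Int) (s v : Int) :
    mapF eb (ib.insert s v) = (mapF eb ib).insert s (mergeF eb v) := by
  apply PySem.Dict.ext
  rw [PySem.Dict.items_insert, mapF, PySem.Dict.items_insert, contains_mapF]
  by_cases h : ib.contains s = true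
  · simp only [h, if_true, mapF]
    show _ = List.map _ (List.map _ _)
    rw [List.map_map, List.map_map]
    apply List.map_congr_left
    intro p _
    by_cases hp : p.1 = s <;> simp [hp]
  · simp only [h, mapF]
    show _ = List.map _ _ ++ _
    simp

-- insert at key e only changes mergeF at value e
theorem mergeF_insert_ne (eb : PySem.Dict Int Int) (e i v : Int) (h : v ≠ e) :
    mergeF (eb.insert e i) v = mergeF eb v := by
  unfold mergeF
  rw [PySem.Dict.contains_insert, PySem.Dict.getD_insert]
  simp [h, beq_iff_eq]

theorem mergeF_insert_self (eb : PySem.Dict Int Int) (e i : Int) :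
    mergeF (eb.insert e i) e = (e, i) := by
  unfold mergeF
  rw [PySem.Dict.contains_insert, PySem.Dict.getD_insert]
  simp

-- A's final merge fold equals mapF
theorem merge_fold_eq_mapF (eb ib : PySem.Dict Int Int) (hnd : ib.keys.Nodup) :
    ib.items.foldl
      (fun r p => r.insert p.1 (if eb.contains p.2 then (p.2, eb.getD p.2 0) else (p.2, p.2)))
      (PySem.Dict.empty : PySem.Dict Int (Int × Int)) = mapF eb ib := by
  apply PySem.Dict.ext
  have := PySem.Dict.items_foldl_insert_fresh (l := ib.items) (k := fun p => p.1)
      (v := fun p => if eb.contains p.2 then (p.2, eb.getD p.2 0) else (p.2, p.2))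
      (d := (PySem.Dict.empty : PySem.Dict Int (Int × Int)))
      (by intro a _; simp [PySem.Dict.contains_empty])
      (by simpa [PySem.Dict.keys] using hnd)
  simp only [this, mapF]
  simp [PySem.Dict.empty, mergeF]

theorem mem_values_of_mem_items {k v : Int} (d : PySem.Dict Int Int)
    (h : (k, v) ∈ d.items) : v ∈ d.values := by
  simp only [PySem.Dict.values, List.mem_map]
  exact ⟨(k, v), h, rfl⟩

theorem snd_mem_values_of_mem_items (d : PySem.Dict Int Int) (p : Int × Int)
    (h : p ∈ d.items) : p.2 ∈ d.values := by
  simp only [PySem.Dict.values, List.mem_map]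
  exact ⟨p, h, rfl⟩

theorem get?_none_of_keys_lt (d : PySem.Dict Int Int) (i : Int)
    (h : ∀ k ∈ d.keys, k < i) : d.get? i = none := by
  rw [PySem.Dict.get?_eq_none_iff_not_mem_keys]
  intro hm
  exact absurd (h i hm) (lt_irrefl i)

theorem contains_false_of_keys_lt (d : PySem.Dict Int Int) (i : Int)
    (h : ∀ k ∈ d.keys, k < i) : d.contains i = false := by
  rw [PySem.Dict.contains_eq_isSome_get?, get?_none_of_keys_lt d i h]
  rfl

theorem mergeF_fresh (eb : PySem.Dict Int Int) (i : Int)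
    (h : ∀ k ∈ eb.keys, k < i) : mergeF eb i = (i, i) := by
  unfold mergeF
  rw [contains_false_of_keys_lt eb i h]
  simp

-- res update on IF_ELSE / IF_END-without-else: inserting a fresh-valued key commutes with mapF
theorem res_insert_fresh (eb ib : PySem.Dict Int Int) (s i : Int)
    (heb : ∀ k ∈ eb.keys, k < i) :
    mapF eb (ib.insert s i) = (mapF eb ib).insert s (i, i) := by
  rw [mapF_insert, mergeF_fresh eb i heb]

-- res update on IF_END with an else: eb.insert e i rewrites exactly entry s of the merged dict
theorem res_insert_end (eb ib : PySem.Dict Int Int) (s e i : Int)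
    (hse : ib.get? s = some e)
    (hinj : ∀ p ∈ ib.items, ∀ q ∈ ib.items, p.2 = q.2 → p = q)
    (hnd : ib.keys.Nodup) :
    mapF (eb.insert e i) ib = (mapF eb ib).insert s (e, i) := by
  have hmem : (s, e) ∈ ib.items := PySem.Dict.mem_items_of_get?_eq_some ib hse
  have hcont : (mapF eb ib).contains s = true := by
    rw [contains_mapF, PySem.Dict.contains_eq_isSome_get?, hse]; rfl
  apply PySem.Dict.ext
  rw [PySem.Dict.items_insert_of_contains _ _ hcont]
  show List.map _ _ = List.map _ (List.map _ _)
  rw [List.map_map]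
  apply List.map_congr_left
  intro p hp
  by_cases hps : p.1 = s
  · have hpe : p.2 = e := by
      have := PySem.Dict.get?_of_mem_items ib hp hnd
      rw [hps, hse] at this
      exact Option.some.inj this.symm
    simp only [Function.comp, hps, hpe, beq_self_eq_true, if_true, mergeF_insert_self]
  · have hpe : p.2 ≠ e := by
      intro hvv
      have : p = (s, e) := hinj p hp (s, e) hmem (by simp [hvv])
      exact hps (by rw [this])
    simp only [Function.comp, mergeF_insert_ne eb e i p.2 hpe]
    have : (p.1 == s) = false := by simp [hps]
    simp [this]

-- value-injectivity is preserved by inserting a value larger than all present values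
theorem val_inj_insert (ib : PySem.Dict Int Int) (s i : Int)
    (hvals : ∀ v ∈ ib.values, v < i)
    (hinj : ∀ p ∈ ib.items, ∀ q ∈ ib.items, p.2 = q.2 → p = q) :
    ∀ p ∈ (ib.insert s i).items, ∀ q ∈ (ib.insert s i).items, p.2 = q.2 → p = q := by
  intro p hp q hq hpq
  rw [PySem.Dict.mem_items_insert] at hp hq
  rcases hp with hp | ⟨hp, hps⟩ <;> rcases hq with hq | ⟨hq, hqs⟩
  · rw [hp, hq]
  · exfalso
    have := hvals q.2 (snd_mem_values_of_mem_items ib q hq)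
    rw [← hpq, hp] at this
    exact absurd this (lt_irrefl i)
  · exfalso
    have := hvals p.2 (snd_mem_values_of_mem_items ib p hp)
    rw [hpq, hq] at this
    exact absurd this (lt_irrefl i)
  · exact hinj p hp q hq hpq

-- one step preserves the invariant
theorem inv_step (i : Int) (c : String) (ib eb : PySem.Dict Int Int) (stkA : List Int)
    (stkB : List (Int × Option Int)) (res : PySem.Dict Int (Int × Int))
    (h : ScanInv i ib eb stkA stkB res) :
    ScanInv (i + 1) (scanAStep (ib, eb, stkA) (i, c)).1 (scanAStep (ib, eb, stkA) (i, c)).2.1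
      (scanAStep (ib, eb, stkA) (i, c)).2.2
      (mStep (stkB, res) (i, c)).1 (mStep (stkB, res) (i, c)).2 := by
  obtain ⟨hfst, hval, hres, hnd, hsnd, hklt, hvlt, helt, hslt, hinj⟩ := h
  subst hfst
  have hrelax : ScanInv (i + 1) ib eb (stkB.map Prod.fst) stkB res := by
    refine ⟨rfl, hval, hres, hnd, hsnd, ?_, ?_, ?_, ?_, hinj⟩ <;>
      intro x hx <;> [exact lt_trans (hklt x hx) (by omega);
        exact lt_trans (hvlt x hx) (by omega);
        exact lt_trans (helt x hx) (by omega);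
        exact lt_trans (hslt x hx) (by omega)]
  by_cases h1 : c = "IF_START"
  · -- push
    simp only [scanAStep, mStep, h1, if_true]
    refine ⟨rfl, ?_, hres, hnd, ?_, ?_, ?_, ?_, ?_, hinj⟩
    · intro p hp
      rcases List.mem_cons.mp hp with hp | hp
      · rw [hp]
        exact get?_none_of_keys_lt ib i hklt
      · exact hval p hp
    · refine List.nodup_cons.mpr ⟨?_, hsnd⟩
      intro hmem
      exact absurd (hslt i hmem) (lt_irrefl i)
    · intro k hk; exact lt_trans (hklt k hk) (by omega)
    · intro v hv; exact lt_trans (hvlt v hv) (by omega)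
    · intro k hk; exact lt_trans (helt k hk) (by omega)
    · intro s hs
      rcases List.mem_cons.mp hs with hs | hs
      · omega
      · exact lt_trans (hslt s hs) (by omega)
  by_cases h2 : c = "IF_ELSE"
  · cases stkB with
    | nil => subst h2; simpa [scanAStep, mStep] using hrelax
    | cons t rest =>
      obtain ⟨s, o⟩ := t
      have hsmem : s ∈ ((s, o) :: rest).map Prod.fst := by simp
      have hsnd' : (s :: rest.map Prod.fst).Nodup := by simpa using hsnd
      have hhead : s ∉ rest.map Prod.fst := (List.nodup_cons.mp hsnd').1
      have hrest_ne : ∀ p ∈ rest, p.1 ≠ s := by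
        intro p hp hps
        exact hhead (by simpa [← hps] using List.mem_map_of_mem (f := Prod.fst) hp)
      subst h2
      simp only [scanAStep, mStep, List.map_cons, String.reduceEq, reduceIte]
      refine ⟨by simp, ?_, ?_, PySem.Dict.nodup_keys_insert ib s i hnd, hsnd', ?_, ?_, ?_, ?_,
        val_inj_insert ib s i hvlt hinj⟩
      · intro p hp
        rcases List.mem_cons.mp hp with hp | hp
        · rw [hp]
          exact PySem.Dict.get?_insert_self ib s i
        · rw [PySem.Dict.get?_insert_of_ne ib i (hrest_ne p hp)]
          exact hval p (List.mem_cons_of_mem _ hp)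
      · rw [hres, res_insert_fresh eb ib s i helt]
      · intro k hk
        rcases (PySem.Dict.mem_keys_insert ib s k i).mp hk with hk | hk
        · rw [hk]; exact lt_trans (hslt s hsmem) (by omega)
        · exact lt_trans (hklt k hk) (by omega)
      · intro v hv
        rcases PySem.Dict.mem_values_insert ib s i v hv with hv | hv
        · omega
        · exact lt_trans (hvlt v hv) (by omega)
      · intro k hk; exact lt_trans (helt k hk) (by omega)
      · intro t ht; exact lt_trans (hslt t ht) (by omega)
  by_cases h3 : c = "IF_END"
  · cases stkB with
    | nil => subst h3; simpa [scanAStep, mStep] using hrelax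
    | cons t rest =>
      obtain ⟨s, o⟩ := t
      have hsmem : s ∈ ((s, o) :: rest).map Prod.fst := by simp
      have hsnd' : (s :: rest.map Prod.fst).Nodup := by simpa using hsnd
      have hhead : s ∉ rest.map Prod.fst := (List.nodup_cons.mp hsnd').1
      have hrest_ne : ∀ p ∈ rest, p.1 ≠ s := by
        intro p hp hps
        exact hhead (by simpa [← hps] using List.mem_map_of_mem (f := Prod.fst) hp)
      have hgs : ib.get? s = o := hval (s, o) (by simp)
      have hrtl : ∀ p ∈ rest, ib.get? p.1 = p.2 := fun p hp => hval p (List.mem_cons_of_mem _ hp)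
      have hrnd : (rest.map Prod.fst).Nodup := (List.nodup_cons.mp hsnd').2
      have hrlt : ∀ t ∈ rest.map Prod.fst, t < i + 1 := by
        intro t ht
        exact lt_trans (hslt t (List.mem_cons_of_mem _ ht)) (by omega)
      cases o with
      | some e =>
        have hcont : ib.contains s = true := by
          rw [PySem.Dict.contains_eq_isSome_get?, hgs]; rfl
        have hgD : ib.getD s 0 = e := PySem.Dict.getD_of_get?_eq_some ib 0 hgs
        subst h3
        simp only [scanAStep, mStep, List.map_cons, String.reduceEq, reduceIte, hcont, hgD]
        refine ⟨by simp, hrtl, ?_, hnd, hrnd, ?_, ?_, ?_, hrlt, hinj⟩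
        · rw [hres, res_insert_end eb ib s e i hgs hinj hnd]
        · intro k hk; exact lt_trans (hklt k hk) (by omega)
        · intro v hv; exact lt_trans (hvlt v hv) (by omega)
        · intro k hk
          rcases (PySem.Dict.mem_keys_insert eb e k i).mp hk with hk | hk
          · rw [hk]
            have : e ∈ ib.values :=
              mem_values_of_mem_items ib (PySem.Dict.mem_items_of_get?_eq_some ib hgs)
            exact lt_trans (hvlt e this) (by omega)
          · exact lt_trans (helt k hk) (by omega)
      | none =>
        have hcont : ib.contains s = false := by
          rw [PySem.Dict.contains_eq_isSome_get?, hgs]; rfl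
        subst h3
        simp only [scanAStep, mStep, List.map_cons, String.reduceEq, reduceIte, hcont,
          Bool.false_eq_true]
        refine ⟨by simp, ?_, ?_, PySem.Dict.nodup_keys_insert ib s i hnd, hrnd, ?_, ?_, ?_, hrlt,
          val_inj_insert ib s i hvlt hinj⟩
        · intro p hp
          rw [PySem.Dict.get?_insert_of_ne ib i (hrest_ne p hp)]
          exact hrtl p hp
        · rw [hres, res_insert_fresh eb ib s i helt]
        · intro k hk
          rcases (PySem.Dict.mem_keys_insert ib s k i).mp hk with hk | hk
          · rw [hk]; exact lt_trans (hslt s hsmem) (by omega)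
          · exact lt_trans (hklt k hk) (by omega)
        · intro v hv
          rcases PySem.Dict.mem_values_insert ib s i v hv with hv | hv
          · omega
          · exact lt_trans (hvlt v hv) (by omega)
        · intro k hk; exact lt_trans (helt k hk) (by omega)
  · simpa [scanAStep, mStep, h1, h2, h3] using hrelax

theorem inv_loop (cmds : List String) (i : Int) (ib eb : PySem.Dict Int Int)
    (stkA : List Int) (stkB : List (Int × Option Int)) (res : PySem.Dict Int (Int × Int))
    (h : ScanInv i ib eb stkA stkB res) :
    ∃ i' ib' eb' stkA' stkB' res',
      (PySem.List.enumerate cmds i).foldl scanAStep (ib, eb, stkA) = (ib', eb', stkA') ∧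
      (PySem.List.enumerate cmds i).foldl mStep (stkB, res) = (stkB', res') ∧
      ScanInv i' ib' eb' stkA' stkB' res' := by
  induction cmds generalizing i ib eb stkA stkB res with
  | nil => exact ⟨i, ib, eb, stkA, stkB, res, rfl, rfl, h⟩
  | cons c cs ih =>
    rw [PySem.List.enumerate_cons]
    have h' := inv_step i c ib eb stkA stkB res h
    simp only [List.foldl_cons]
    obtain ⟨i', ib', eb', stkA', stkB', res', hA, hB, hinv⟩ :=
      ih (i + 1) (scanAStep (ib, eb, stkA) (i, c)).1 (scanAStep (ib, eb, stkA) (i, c)).2.1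
        (scanAStep (ib, eb, stkA) (i, c)).2.2
        (mStep (stkB, res) (i, c)).1 (mStep (stkB, res) (i, c)).2 h'
    exact ⟨i', ib', eb', stkA', stkB', res', by rw [← hA], by rw [← hB], hinv⟩

theorem A_eq_M (commands : List String) :
    scan_for_if_blocks commands =
      ((PySem.List.enumerate commands).foldl mStep ([], PySem.Dict.empty)).2.items := by
  unfold scan_for_if_blocks
  obtain ⟨i', ib', eb', stkA', stkB', res', hA, hB, hinv⟩ :=
    inv_loop commands 0 PySem.Dict.empty PySem.Dict.empty [] [] PySem.Dict.empty inv_init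
  simp only [hA, hB]
  rw [merge_fold_eq_mapF eb' ib' hinv.ib_nodup, ← hinv.res_eq]

-- ---------- part 2 : M = B (recursive descent) on inputs without a dangling else ----------

-- M's result segment for one still-open block
def segOf (s : Int) (ep : Option Int) (pre post : List (Int × Int × Int)) :
    List (Int × Int × Int) :=
  match ep with
  | none => pre
  | some e => pre ++ (s, (e, e)) :: post

theorem upd_map_id (l : List (Int × Int × Int)) (s : Int) (v : Int × Int)
    (h : s ∉ l.map Prod.fst) :
    l.map (fun p => if p.1 == s then (s, v) else p) = l := by
  induction l with
  | nil => rfl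
  | cons q t ih =>
    simp only [List.map_cons, List.mem_cons, not_or] at h ⊢
    rw [if_neg (by simpa using (Ne.symm h.1)), ih h.2]

theorem upd_map_mid (l1 l2 : List (Int × Int × Int)) (s : Int) (v w : Int × Int)
    (h1 : s ∉ l1.map Prod.fst) (h2 : s ∉ l2.map Prod.fst) :
    (l1 ++ (s, w) :: l2).map (fun p => if p.1 == s then (s, v) else p) = l1 ++ (s, v) :: l2 := by
  rw [List.map_append, List.map_cons, upd_map_id l1 s v h1, upd_map_id l2 s v h2]
  simp

theorem insert_mid (res : PySem.Dict Int (Int × Int)) (ctx post : List (Int × Int × Int))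
    (s : Int) (w v : Int × Int)
    (hit : res.items = ctx ++ (s, w) :: post) (hnd : res.keys.Nodup) :
    (res.insert s v).items = ctx ++ (s, v) :: post ∧ (res.insert s v).keys = res.keys := by
  have hkeys : res.keys = ctx.map Prod.fst ++ s :: post.map Prod.fst := by
    simp [PySem.Dict.keys, hit]
  have hmem : s ∈ res.keys := by rw [hkeys]; simp
  have hcont : res.contains s = true := by
    rw [PySem.Dict.contains_eq_decide_mem_keys]; simpa using hmem
  have hnd' := hnd
  rw [hkeys] at hnd'
  rw [List.nodup_append] at hnd'
  obtain ⟨-, hn2, hdisj⟩ := hnd'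
  have h1 : s ∉ ctx.map Prod.fst := fun hc =>
    hdisj s hc s (List.mem_cons_self ..) rfl
  have h2 : s ∉ post.map Prod.fst := (List.nodup_cons.mp hn2).1
  constructor
  · rw [PySem.Dict.items_insert_of_contains _ _ hcont, hit, upd_map_mid ctx post s v w h1 h2]
  · exact PySem.Dict.keys_insert_of_contains _ _ hcont

theorem insert_fresh (res : PySem.Dict Int (Int × Int)) (s : Int) (v : Int × Int)
    (h : s ∉ res.keys) :
    (res.insert s v).items = res.items ++ [(s, v)] ∧
      (res.insert s v).keys = res.keys ++ [s] := by
  have hcont : res.contains s = false := by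
    rw [PySem.Dict.contains_eq_decide_mem_keys]; simpa using h
  refine ⟨PySem.Dict.items_insert_of_not_contains _ _ hcont, ?_⟩
  exact PySem.Dict.keys_insert_of_not_contains _ _ hcont

theorem segOf_append (st : Int) (ep : Option Int) (pre post sub : List (Int × Int × Int)) :
    segOf st ep pre post ++ sub =
      segOf st ep (if ep.isSome then pre else pre ++ sub)
        (if ep.isSome then post ++ sub else post) := by
  cases ep <;> simp [segOf]

theorem nodup_concat_int (l : List Int) (a : Int) (h : l.Nodup) (ha : a ∉ l) :
    (l ++ [a]).Nodup := by
  rw [List.nodup_append]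
  refine ⟨h, by simp, ?_⟩
  intro x hx b hb
  simp only [List.mem_singleton] at hb
  subst hb
  exact fun hxa => ha (hxa ▸ hx)

-- the central simulation lemma: one blockB call against M's fold over the same segment;
-- either the block closes (left disjunct) or it swallows the rest of the input (right)
theorem blockB_sim : ∀ (N : Nat) (rest : List String), rest.length ≤ N →
    ∀ (j start : Int) (ep : Option Int) (pre post : List (Int × Int × Int))
      (stk : List (Int × Option Int)) (res : PySem.Dict Int (Int × Int))
      (ctx : List (Int × Int × Int)),
      res.items = ctx ++ segOf start ep pre post →
      res.keys.Nodup →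
      (∀ k ∈ res.keys, k < j) →
      start < j →
      (ep = none → post = [] ∧ start ∉ res.keys) →
      ((∃ res' : PySem.Dict Int (Int × Int),
          (PySem.List.enumerate rest j).foldl mStep ((start, ep) :: stk, res)
            = (PySem.List.enumerate (blockB start ep pre post j rest).1.2
                 (blockB start ep pre post j rest).1.1.2).foldl mStep (stk, res')
          ∧ res'.items = ctx ++ (blockB start ep pre post j rest).1.1.1
          ∧ res'.keys.Nodup
          ∧ (∀ k ∈ res'.keys, k < (blockB start ep pre post j rest).1.1.2)
          ∧ j ≤ (blockB start ep pre post j rest).1.1.2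
          ∧ (∀ x, x ∉ res.keys → x < start → x ∉ res'.keys))
      ∨ ((blockB start ep pre post j rest).1.2 = [] ∧
        ∃ (frames : List (Int × Option Int)) (epF : Option Int)
          (res' : PySem.Dict Int (Int × Int)),
          (PySem.List.enumerate rest j).foldl mStep ((start, ep) :: stk, res)
            = (frames ++ (start, epF) :: stk, res')
          ∧ ((∀ f ∈ frames, f.2 = none) → epF = none →
              res'.items = ctx ++ (blockB start ep pre post j rest).1.1.1 ∧
                res'.keys.Nodup)
          ∧ res'.items.length = ctx.length + (blockB start ep pre post j rest).1.1.1.length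
              + ((frames ++ [(start, epF)]).filter (fun f => f.2.isSome)).length)) := by
  intro N
  induction N with
  | zero =>
    intro rest hlen j start ep pre post stk res ctx hitems hnd hb hstart hep
    have : rest = [] := List.eq_nil_of_length_eq_zero (by omega)
    subst this
    rw [blockB]
    refine Or.inr ⟨rfl, [], ep, res, by simp [PySem.List.enumerate], ?_, ?_⟩
    · intro _ hepn
      obtain ⟨hpost, -⟩ := hep hepn
      subst hepn
      exact ⟨by simpa [segOf, hpost] using hitems, hnd⟩
    · cases ep with
      | none =>
        obtain ⟨hpost, -⟩ := hep rfl
        subst hpost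
        simp [hitems, segOf]
      | some e => simp [hitems, segOf]; omega
  | succ n ih =>
    intro rest hlen j start ep pre post stk res ctx hitems hnd hb hstart hep
    cases rest with
    | nil =>
      rw [blockB]
      refine Or.inr ⟨rfl, [], ep, res, by simp [PySem.List.enumerate], ?_, ?_⟩
      · intro _ hepn
        obtain ⟨hpost, -⟩ := hep hepn
        subst hepn
        exact ⟨by simpa [segOf, hpost] using hitems, hnd⟩
      · cases ep with
        | none =>
          obtain ⟨hpost, -⟩ := hep rfl
          subst hpost
          simp [hitems, segOf]
        | some e => simp [hitems, segOf]; omega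
    | cons c tl =>
      have hlen' : tl.length ≤ n := by simpa using hlen
      rw [blockB.eq_def]
      simp only
      rw [PySem.List.enumerate_cons, List.foldl_cons]
      by_cases h1 : c = "IF_START"
      · subst h1
        simp only [String.reduceEq, reduceIte]
        have hstep : mStep ((start, ep) :: stk, res) (j, "IF_START")
            = ((j, none) :: (start, ep) :: stk, res) := by simp [mStep]
        rw [hstep]
        -- nested block
        have hnested := ih tl hlen' (j + 1) j none [] [] ((start, ep) :: stk) res
          (res.items) (by simp [segOf]) hnd
          (fun k hk => lt_trans (hb k hk) (by omega)) (by omega)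
          (fun _ => ⟨rfl, fun hm => absurd (hb j hm) (lt_irrefl j)⟩)
        rcases hr : blockB j none [] [] (j + 1) tl with ⟨⟨⟨sub, j2⟩, rest2⟩, hp⟩
        rw [hr] at hnested
        simp only at hnested hp ⊢
        rcases hnested with ⟨resN, heqN, hitN, hndN, hbN, hjN, hkN⟩ |
            ⟨hrest2, framesN, epN, resN, heqN, hcondN, hcntN⟩
        · -- nested block closed; continue the loop on rest2
          rw [heqN]
          have hcont := ih rest2 (by omega) j2 start ep
            (if ep.isSome then pre else pre ++ sub)
            (if ep.isSome then post ++ sub else post) stk resN ctx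
            (by rw [hitN, hitems, List.append_assoc, segOf_append])
            hndN hbN (by omega)
            (by
              intro hepn
              obtain ⟨hpost, hsk⟩ := hep hepn
              subst hepn
              exact ⟨by simpa using hpost, hkN start hsk hstart⟩)
          rcases hr2 : blockB start ep (if ep.isSome then pre else pre ++ sub)
              (if ep.isSome then post ++ sub else post) j2 rest2 with ⟨⟨⟨sub2, j3⟩, rest3⟩, hp2⟩
          rw [hr2] at hcont
          simp only at hcont ⊢
          rcases hcont with ⟨res2, heq2, hit2, hnd2, hb2, hj2, hk2⟩ |
              ⟨hrest3, frames2, epF2, res2, heq2, hcond2, hcnt2⟩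
          · exact Or.inl ⟨res2, heq2, hit2, hnd2, hb2, by omega,
              fun x hx hxs => hk2 x (hkN x hx (by omega)) hxs⟩
          · exact Or.inr ⟨hrest3, frames2, epF2, res2, heq2, hcond2, hcnt2⟩
        · -- nested block swallowed the rest of the input
          subst hrest2
          rw [blockB.eq_def]
          simp only
          rw [heqN]
          refine Or.inr ⟨by trivial, framesN ++ [(j, epN)], ep, resN, by simp, ?_, ?_⟩
          · intro hfr hepn
            have hepN : epN = none := hfr (j, epN) (by simp)
            obtain ⟨hitN, hndN⟩ := hcondN (fun f hf => hfr f (by simp [hf])) hepN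
            obtain ⟨hpost, -⟩ := hep hepn
            subst hepn
            subst hpost
            refine ⟨?_, hndN⟩
            rw [hitN, hitems]
            simp [segOf]
          · rw [hcntN, hitems]
            cases ep with
            | none =>
              obtain ⟨hpost, -⟩ := hep rfl
              subst hpost
              cases epN <;> simp [segOf, List.filter_append] <;> omega
            | some e =>
              cases epN <;> simp [segOf, List.filter_append] <;> omega
      by_cases h2 : c = "IF_ELSE"
      · subst h2
        simp only [String.reduceEq, reduceIte]
        have hstep : mStep ((start, ep) :: stk, res) (j, "IF_ELSE")
            = ((start, some j) :: stk, res.insert start (j, j)) := by simp [mStep]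
        rw [hstep]
        -- the inserted provisional entry keeps/creates position inside the segment
        have hres' : (res.insert start (j, j)).items
              = ctx ++ segOf start (some j) pre post ∧
            (res.insert start (j, j)).keys.Nodup ∧
            (∀ k ∈ (res.insert start (j, j)).keys, k < j + 1) ∧
            (∀ x, x ∉ res.keys → x ≠ start → x ∉ (res.insert start (j, j)).keys) := by
          cases ep with
          | none =>
            obtain ⟨hpost, hsk⟩ := hep rfl
            subst hpost
            obtain ⟨hi, hk⟩ := insert_fresh res start (j, j) hsk
            refine ⟨by rw [hi, hitems]; simp [segOf], ?_, ?_, ?_⟩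
            · rw [hk]; exact nodup_concat_int _ _ hnd hsk
            · intro k hk'
              rw [hk] at hk'
              rcases List.mem_append.mp hk' with hk' | hk'
              · exact lt_trans (hb k hk') (by omega)
              · simp at hk'; omega
            · intro x hx hxs
              rw [hk]
              intro hmem
              rcases List.mem_append.mp hmem with hm | hm
              · exact hx hm
              · simp at hm; exact hxs hm
          | some e =>
            obtain ⟨hi, hk⟩ := insert_mid res (ctx ++ pre) post start (e, e) (j, j)
              (by rw [hitems]; simp [segOf]) hnd
            refine ⟨by rw [hi]; simp [segOf], by rw [hk]; exact hnd, ?_, ?_⟩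
            · intro k hk'
              rw [hk] at hk'
              exact lt_trans (hb k hk') (by omega)
            · intro x hx _
              rw [hk]; exact hx
        obtain ⟨hi', hnd', hb', hk'⟩ := hres'
        have hcont := ih tl hlen' (j + 1) start (some j) pre post stk
          (res.insert start (j, j)) ctx hi' hnd' hb' (by omega) (by intro h; cases h)
        rcases hr : blockB start (some j) pre post (j + 1) tl with ⟨⟨⟨sub2, j3⟩, rest3⟩, hp2⟩
        rw [hr] at hcont
        simp only at hcont ⊢
        rcases hcont with ⟨res2, heq2, hit2, hnd2, hb2, hj2, hk2⟩ |
            ⟨hrest3, frames2, epF2, res2, heq2, hcond2, hcnt2⟩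
        · exact Or.inl ⟨res2, heq2, hit2, hnd2, hb2, by omega,
            fun x hx hxs => hk2 x (hk' x hx (by omega)) hxs⟩
        · exact Or.inr ⟨hrest3, frames2, epF2, res2, heq2, hcond2, hcnt2⟩
      by_cases h3 : c = "IF_END"
      · subst h3
        simp only [String.reduceEq, reduceIte]
        cases ep with
        | some e =>
          obtain ⟨hi, hk⟩ := insert_mid res (ctx ++ pre) post start (e, e) (e, j)
            (by rw [hitems]; simp [segOf]) hnd
          have hstep : mStep ((start, some e) :: stk, res) (j, "IF_END")
              = (stk, res.insert start (e, j)) := by simp [mStep]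
          rw [hstep]
          refine Or.inl ⟨res.insert start (e, j), rfl, ?_, ?_, ?_, by omega, ?_⟩
          · rw [hi]; simp
          · rw [hk]; exact hnd
          · intro k hk'; rw [hk] at hk'; exact lt_trans (hb k hk') (by omega)
          · intro x hx _; rw [hk]; exact hx
        | none =>
          obtain ⟨hpost, hsk⟩ := hep rfl
          subst hpost
          obtain ⟨hi, hk⟩ := insert_fresh res start (j, j) hsk
          have hstep : mStep ((start, none) :: stk, res) (j, "IF_END")
              = (stk, res.insert start (j, j)) := by simp [mStep]
          rw [hstep]
          refine Or.inl ⟨res.insert start (j, j), rfl, ?_, ?_, ?_, by omega, ?_⟩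
          · rw [hi, hitems]; simp [segOf]
          · rw [hk]; exact nodup_concat_int _ _ hnd hsk
          · intro k hk'; rw [hk] at hk'
            rcases List.mem_append.mp hk' with hk' | hk'
            · exact lt_trans (hb k hk') (by omega)
            · simp at hk'; omega
          · intro x hx hxs; rw [hk]
            intro hmem
            rcases List.mem_append.mp hmem with hm | hm
            · exact hx hm
            · simp at hm; omega
      · -- any other command: the state is unchanged
        simp only [if_neg h1, if_neg h2, if_neg h3]
        have hstep : mStep ((start, ep) :: stk, res) (j, c) = ((start, ep) :: stk, res) := by
          simp [mStep, h1, h2, h3]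
        rw [hstep]
        have hcont := ih tl hlen' (j + 1) start ep pre post stk res ctx hitems hnd
          (fun k hk => lt_trans (hb k hk) (by omega)) (by omega)
          (fun hepn => (hep hepn))
        rcases hr : blockB start ep pre post (j + 1) tl with ⟨⟨⟨sub2, j3⟩, rest3⟩, hp2⟩
        rw [hr] at hcont
        simp only at hcont ⊢
        rcases hcont with ⟨res2, heq2, hit2, hnd2, hb2, hj2, hk2⟩ |
            ⟨hrest3, frames2, epF2, res2, heq2, hcond2, hcnt2⟩
        · exact Or.inl ⟨res2, heq2, hit2, hnd2, hb2, by omega, hk2⟩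
        · exact Or.inr ⟨hrest3, frames2, epF2, res2, heq2, hcond2, hcnt2⟩

theorem top_sim (N : Nat) :
    ∀ (rest : List String), rest.length ≤ N →
    ∀ (j : Int) (acc : List (Int × Int × Int)) (res : PySem.Dict Int (Int × Int)),
      res.items = acc → res.keys.Nodup → (∀ k ∈ res.keys, k < j) →
      (((∀ f ∈ ((PySem.List.enumerate rest j).foldl mStep ([], res)).1, f.2 = none) →
        ((PySem.List.enumerate rest j).foldl mStep ([], res)).2.items = topB acc j rest ∧
          ((PySem.List.enumerate rest j).foldl mStep ([], res)).2.keys.Nodup)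
      ∧ ((PySem.List.enumerate rest j).foldl mStep ([], res)).2.items.length
          = (topB acc j rest).length
            + ((((PySem.List.enumerate rest j).foldl mStep ([], res)).1.filter
                (fun f => f.2.isSome)).length)) := by
  induction N with
  | zero =>
    intro rest hlen j acc res hit hnd hb
    have : rest = [] := List.eq_nil_of_length_eq_zero (by omega)
    subst this
    exact ⟨fun _ => by simpa [topB, PySem.List.enumerate] using ⟨hit, hnd⟩,
      by simp [topB, PySem.List.enumerate, hit]⟩
  | succ n ih =>
    intro rest hlen j acc res hit hnd hb
    cases rest with
    | nil =>
      exact ⟨fun _ => by simpa [topB, PySem.List.enumerate] using ⟨hit, hnd⟩,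
        by simp [topB, PySem.List.enumerate, hit]⟩
    | cons c tl =>
      rw [PySem.List.enumerate_cons, List.foldl_cons]
      by_cases hc : c = "IF_START"
      · subst hc
        have hstep : mStep ([], res) (j, "IF_START") = ([(j, none)], res) := by
          simp [mStep]
        rw [hstep]
        have hsim := blockB_sim n tl (by simpa using hlen) (j + 1) j none [] [] []
          res acc (by simpa [segOf] using hit) hnd
          (fun k hk => lt_trans (hb k hk) (by omega)) (by omega)
          (fun _ => ⟨rfl, fun hm => absurd (hb j hm) (lt_irrefl j)⟩)
        rcases hsim with ⟨res', heq, hit', hnd', hb', hj', _⟩ |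
            ⟨hcl, frames, epF, res', heq, hcond, hcnt⟩
        · rw [heq]
          have := ih (blockB j none [] [] (j + 1) tl).1.2
            (by have := (blockB j none [] [] (j + 1) tl).2; simp at hlen ⊢; omega)
            (blockB j none [] [] (j + 1) tl).1.1.2
            (acc ++ (blockB j none [] [] (j + 1) tl).1.1.1) res' hit' hnd' hb'
          rw [topB]
          rcases hr : blockB j none [] [] (j + 1) tl with ⟨⟨⟨sub, j2⟩, rest2⟩, hp⟩
          rw [hr] at this
          simp only at this ⊢
          simp only [String.reduceEq, reduceIte]
          exact this
        · -- the block swallows the rest of the input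
          rw [heq]
          rw [topB]
          rcases hr : blockB j none [] [] (j + 1) tl with ⟨⟨⟨sub, j2⟩, rest2⟩, hp⟩
          rw [hr] at hcl hcond hcnt
          simp only at hcl hcond hcnt
          subst hcl
          simp only [String.reduceEq, reduceIte]
          rw [topB]
          constructor
          · intro hall
            have hfr : ∀ f ∈ frames, f.2 = none := fun f hf => hall f (by simp [hf])
            have hep : epF = none := hall (j, epF) (by simp)
            exact hcond hfr hep
          · rw [hcnt]
            simp [List.filter_append]
      · have hstep : mStep ([], res) (j, c) = ([], res) := by
          simp only [mStep, if_neg hc]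
          by_cases h2 : c = "IF_ELSE" <;> by_cases h3 : c = "IF_END" <;>
            simp [h2, h3]
        rw [hstep]
        have := ih tl (by simpa using Nat.le_of_succ_le_succ hlen) (j + 1) acc res hit hnd
          (fun k hk => lt_trans (hb k hk) (by omega))
        rw [topB]
        simp only [if_neg hc]
        exact this

-- ---------- part 3 : a frame with an else left on M's final stack means D_ ----------

def FrameOK (cmds : List String) (t : Nat) (dep : Nat) (f : Int × Option Int) : Prop :=
  ∀ e, f.2 = some e → ∃ te : Nat, (te : Int) = e ∧ te < t ∧
    cmds.getD te "" = "IF_ELSE" ∧ pvDepth cmds te = (dep : Int) ∧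
    ∀ k : Nat, te < k → k < t → ¬(cmds.getD k "" = "IF_END" ∧ pvDepth cmds k = (dep : Int))

def StackOK (cmds : List String) (t : Nat) (stk : List (Int × Option Int)) : Prop :=
  pvDepth cmds t = (stk.length : Int) ∧
  ∀ (u v : List (Int × Option Int)) (f : Int × Option Int), stk = u ++ f :: v →
    FrameOK cmds t (v.length + 1) f

theorem pvDepth_succ (cmds : List String) (t : Nat) (c : String) (h : cmds[t]? = some c) :
    pvDepth cmds (t + 1) = pvDepthStep (pvDepth cmds t) c := by
  unfold pvDepth
  rw [List.take_succ, h, List.foldl_append]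
  rfl

theorem frameOK_succ (cmds : List String) (t : Nat) (dep : Nat) (f : Int × Option Int)
    (hne : ¬(cmds.getD t "" = "IF_END" ∧ pvDepth cmds t = (dep : Int)))
    (hok : FrameOK cmds t dep f) : FrameOK cmds (t + 1) dep f := by
  intro e he
  obtain ⟨te, h1, h2, h3, h4, h5⟩ := hok e he
  refine ⟨te, h1, by omega, h3, h4, ?_⟩
  intro k hk1 hk2
  rcases Nat.lt_or_ge k t with hk | hk
  · exact h5 k hk1 hk
  · have : k = t := by omega
    subst this
    exact hne

theorem stack_step (cmds : List String) (t : Nat) (c : String) (h : cmds[t]? = some c)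
    (stk : List (Int × Option Int)) (res : PySem.Dict Int (Int × Int))
    (hok : StackOK cmds t stk) :
    StackOK cmds (t + 1) (mStep (stk, res) ((t : Int), c)).1 := by
  obtain ⟨hd, hfr⟩ := hok
  have hgetD : cmds.getD t "" = c := by rw [List.getD_eq_getElem?_getD, h]; rfl
  have hsucc : pvDepth cmds (t + 1) = pvDepthStep (pvDepth cmds t) c := pvDepth_succ cmds t c h
  by_cases h1 : c = "IF_START"
  · subst h1
    simp only [mStep, String.reduceEq, reduceIte]
    refine ⟨?_, ?_⟩
    · rw [hsucc, hd]; simp [pvDepthStep]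
    · intro u v f huv
      cases u with
      | nil =>
        simp only [List.nil_append, List.cons.injEq] at huv
        intro e he
        rw [← huv.1] at he
        simp at he
      | cons g u' =>
        simp only [List.cons_append, List.cons.injEq] at huv
        refine frameOK_succ cmds t _ f ?_ (hfr u' v f huv.2)
        rw [hgetD]
        simp
  by_cases h2 : c = "IF_ELSE"
  · subst h2
    cases stk with
    | nil =>
      simp only [mStep, String.reduceEq, reduceIte]
      refine ⟨?_, ?_⟩
      · rw [hsucc, hd]; simp [pvDepthStep]
      · intro u v f huv; simp at huv
    | cons g rest =>
      obtain ⟨s, o⟩ := g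
      simp only [mStep, String.reduceEq, reduceIte]
      refine ⟨?_, ?_⟩
      · rw [hsucc, hd]; simp [pvDepthStep]
      · intro u v f huv
        cases u with
        | nil =>
          simp only [List.nil_append, List.cons.injEq] at huv
          obtain ⟨hf, hv⟩ := huv
          intro e he
          rw [← hf] at he
          simp only at he
          refine ⟨t, Option.some.inj he, by omega, hgetD, ?_, ?_⟩
          · rw [hd, hv]; simp
          · intro k hk1 hk2; omega
        | cons g' u' =>
          simp only [List.cons_append, List.cons.injEq] at huv
          refine frameOK_succ cmds t _ f ?_ (hfr ((s, o) :: u') v f (by rw [huv.2]; rfl))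
          rw [hgetD]
          simp
  by_cases h3 : c = "IF_END"
  · subst h3
    cases stk with
    | nil =>
      simp only [mStep, String.reduceEq, reduceIte]
      refine ⟨?_, ?_⟩
      · rw [hsucc, hd]; simp [pvDepthStep]
      · intro u v f huv; simp at huv
    | cons g rest =>
      obtain ⟨s, o⟩ := g
      simp only [mStep, String.reduceEq, reduceIte]
      refine ⟨?_, ?_⟩
      · rw [hsucc, hd]; simp [pvDepthStep]
      · intro u v f huv
        refine frameOK_succ cmds t _ f ?_ (hfr ((s, o) :: u) v f (by rw [huv]; rfl))
        rw [hgetD]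
        intro hcon
        have hlen : rest.length = u.length + v.length + 1 := by
          have := congrArg List.length huv; simpa using this
        rw [hd] at hcon
        simp only [List.length_cons] at hcon
        omega
  · simp only [mStep, if_neg h1, if_neg h2, if_neg h3]
    refine ⟨?_, ?_⟩
    · rw [hsucc, hd]; simp [pvDepthStep, h1, h3]
    · intro u v f huv
      refine frameOK_succ cmds t _ f ?_ (hfr u v f huv)
      rw [hgetD]
      intro hcon
      exact h3 hcon.1

theorem stack_fold (cmds : List String) :
    ∀ (suf rest2 : List String) (t : Nat), cmds.drop t = suf ++ rest2 →
    ∀ (stk : List (Int × Option Int)) (res : PySem.Dict Int (Int × Int)),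
      StackOK cmds t stk →
      StackOK cmds (t + suf.length) ((PySem.List.enumerate suf (t : Int)).foldl mStep (stk, res)).1 := by
  intro suf
  induction suf with
  | nil => intro rest2 t _ stk res hok; simpa using hok
  | cons c tl ih =>
    intro rest2 t hdrop stk res hok
    have hget : cmds[t]? = some c := by
      have h0 : (cmds.drop t)[0]? = some c := by rw [hdrop]; rfl
      rwa [List.getElem?_drop, Nat.add_zero] at h0
    have hdrop' : cmds.drop (t + 1) = tl ++ rest2 := by
      have : (cmds.drop t).drop 1 = tl ++ rest2 := by rw [hdrop]; rfl
      rwa [List.drop_drop] at this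
    rw [PySem.List.enumerate_cons, List.foldl_cons]
    have hstep := stack_step cmds t c hget stk res hok
    have := ih rest2 (t + 1) hdrop' (mStep (stk, res) ((t : Int), c)).1
      (mStep (stk, res) ((t : Int), c)).2 hstep
    have harith : t + (tl.length + 1) = (t + 1) + tl.length := by omega
    rw [List.length_cons, harith]
    have hcast : ((t : Int) + 1) = (((t + 1 : Nat)) : Int) := by push_cast; ring
    rw [hcast]
    simpa using this

theorem dangling_of_frame (cmds : List String) (stk : List (Int × Option Int))
    (hok : StackOK cmds cmds.length stk)
    (f : Int × Option Int) (hf : f ∈ stk) (e : Int) (he : f.2 = some e) :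
    D_scan_for_if_blocks cmds := by
  obtain ⟨u, v, huv⟩ := List.append_of_mem hf
  obtain ⟨te, h1, h2, h3, h4, h5⟩ := hok.2 u v f huv e he
  unfold D_scan_for_if_blocks
  rw [List.any_eq_true]
  refine ⟨te, by simpa using h2, ?_⟩
  unfold pvDanglingElseAt
  rw [Bool.and_eq_true, Bool.and_eq_true]
  refine ⟨⟨by simpa using h3, by rw [h4]; simp⟩, ?_⟩
  rw [List.all_eq_true]
  intro k hk
  rw [List.mem_range] at hk
  by_cases hlt : te < k
  · have := h5 k hlt hk
    simp only [Bool.not_eq_eq_eq_not, Bool.not_true, Bool.and_eq_false_iff]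
    by_cases hend : cmds.getD k "" = "IF_END"
    · right
      rw [beq_eq_false_iff_ne]
      intro hdep
      exact this ⟨hend, by rw [← h4, hdep]⟩
    · have : ¬ cmds[k]?.getD "" = "IF_END" := by
        rwa [List.getD_eq_getElem?_getD] at hend
      simp [this]
  · have hd0 : decide (te < k) = false := by simp [hlt]
    simp [hd0]

theorem stackOK_zero (cmds : List String) : StackOK cmds 0 [] := by
  refine ⟨by simp [pvDepth], ?_⟩
  intro u v f huv
  simp at huv

-- a frame whose else has been seen, sitting at stack depth dep
def HasSomeAt (dep : Nat) (stk : List (Int × Option Int)) : Prop :=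
  ∃ u s e v, stk = u ++ ((s : Int), some (e : Int)) :: v ∧ v.length + 1 = dep

theorem persist_step (cmds : List String) (t : Nat) (c : String) (h : cmds[t]? = some c)
    (stk : List (Int × Option Int)) (res : PySem.Dict Int (Int × Int))
    (hok : StackOK cmds t stk) (dep : Nat)
    (hne : ¬(c = "IF_END" ∧ pvDepth cmds t = (dep : Int)))
    (hs : HasSomeAt dep stk) : HasSomeAt dep (mStep (stk, res) ((t : Int), c)).1 := by
  obtain ⟨u, s0, e0, v, hstk, hdep⟩ := hs
  by_cases h1 : c = "IF_START"
  · subst h1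
    simp only [mStep, String.reduceEq, reduceIte]
    exact ⟨((t : Int), none) :: u, s0, e0, v, by rw [hstk]; rfl, hdep⟩
  by_cases h2 : c = "IF_ELSE"
  · subst h2
    cases stk with
    | nil => simp at hstk
    | cons g rest =>
      obtain ⟨a, b⟩ := g
      simp only [mStep, String.reduceEq, reduceIte]
      cases u with
      | nil =>
        simp only [List.nil_append, List.cons.injEq] at hstk
        exact ⟨[], a, (t : Int), rest, rfl, by rw [hstk.2]; exact hdep⟩
      | cons g' u' =>
        simp only [List.cons_append, List.cons.injEq] at hstk
        exact ⟨(a, some (t : Int)) :: u', s0, e0, v, by rw [hstk.2]; rfl, hdep⟩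
  by_cases h3 : c = "IF_END"
  · subst h3
    cases stk with
    | nil => simp at hstk
    | cons g rest =>
      obtain ⟨a, b⟩ := g
      simp only [mStep, String.reduceEq, reduceIte]
      cases u with
      | nil =>
        exfalso
        apply hne
        refine ⟨rfl, ?_⟩
        rw [hok.1, hstk]
        simp only [List.nil_append, List.length_cons]
        omega
      | cons g' u' =>
        simp only [List.cons_append, List.cons.injEq] at hstk
        exact ⟨u', s0, e0, v, hstk.2, hdep⟩
  · simp only [mStep, if_neg h1, if_neg h2, if_neg h3]
    exact ⟨u, s0, e0, v, hstk, hdep⟩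

theorem persist_fold (cmds : List String) (dep : Nat) :
    ∀ (suf : List String) (t : Nat), cmds.drop t = suf →
    ∀ (stk : List (Int × Option Int)) (res : PySem.Dict Int (Int × Int)),
      StackOK cmds t stk → HasSomeAt dep stk →
      (∀ k : Nat, t ≤ k → k < cmds.length →
        ¬(cmds.getD k "" = "IF_END" ∧ pvDepth cmds k = (dep : Int))) →
      HasSomeAt dep ((PySem.List.enumerate suf (t : Int)).foldl mStep (stk, res)).1 := by
  intro suf
  induction suf with
  | nil => intro t _ stk res _ hs _; simpa using hs
  | cons c tl ih =>
    intro t hdrop stk res hok hs hne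
    have hget : cmds[t]? = some c := by
      have h0 : (cmds.drop t)[0]? = some c := by rw [hdrop]; rfl
      rwa [List.getElem?_drop, Nat.add_zero] at h0
    have hdrop' : cmds.drop (t + 1) = tl := by
      have : (cmds.drop t).drop 1 = tl := by rw [hdrop]; rfl
      rwa [List.drop_drop] at this
    have htlt : t < cmds.length := by
      by_contra hle
      rw [List.drop_eq_nil_of_le (by omega)] at hdrop
      cases hdrop
    have hgetD : cmds.getD t "" = c := by rw [List.getD_eq_getElem?_getD, hget]; rfl
    rw [PySem.List.enumerate_cons, List.foldl_cons]
    have hcast : ((t : Int) + 1) = (((t + 1 : Nat)) : Int) := by push_cast; ring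
    rw [hcast]
    exact ih (t + 1) hdrop' _ _ (stack_step cmds t c hget stk res hok)
      (persist_step cmds t c hget stk res hok dep
        (by rw [← hgetD]; exact hne t (le_refl t) htlt) hs)
      (fun k hk1 hk2 => hne k (by omega) hk2)

theorem some_frame_of_D (cmds : List String) (hD : D_scan_for_if_blocks cmds) :
    ∃ f ∈ ((PySem.List.enumerate cmds).foldl mStep ([], PySem.Dict.empty)).1,
      f.2.isSome = true := by
  unfold D_scan_for_if_blocks at hD
  rw [List.any_eq_true] at hD
  obtain ⟨te, hmem, hdang⟩ := hD
  rw [List.mem_range] at hmem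
  unfold pvDanglingElseAt at hdang
  rw [Bool.and_eq_true, Bool.and_eq_true] at hdang
  obtain ⟨⟨hbeq, hdec⟩, hall⟩ := hdang
  have helse : cmds.getD te "" = "IF_ELSE" := by simpa using hbeq
  have hpos : 0 < pvDepth cmds te := of_decide_eq_true hdec
  have hnend : ∀ k : Nat, te < k → k < cmds.length →
      ¬(cmds.getD k "" = "IF_END" ∧ pvDepth cmds k = pvDepth cmds te) := by
    rintro k hk1 hk2 ⟨hkE, hkD⟩
    have := (List.all_eq_true.mp hall) k (by rw [List.mem_range]; exact hk2)
    rw [List.getD_eq_getElem?_getD] at hkE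
    simp [hk1, hkE, hkD] at this
  have hlen : (cmds.take te).length = te := by simp; omega
  have hok1 : StackOK cmds te
      ((PySem.List.enumerate (cmds.take te) ((0 : Nat) : Int)).foldl mStep
        ([], PySem.Dict.empty)).1 := by
    have := stack_fold cmds (cmds.take te) (cmds.drop te) 0 (by simp) []
      PySem.Dict.empty (stackOK_zero cmds)
    rw [hlen] at this
    simpa using this
  have hsplit : PySem.List.enumerate cmds (0 : Int)
      = PySem.List.enumerate (cmds.take te) (0 : Int)
        ++ PySem.List.enumerate (cmds.drop te) ((te : Nat) : Int) := by
    conv_lhs => rw [← List.take_append_drop te cmds]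
    rw [PySem.List.enumerate_append, hlen]
    norm_num
  have h2 : cmds[te] = "IF_ELSE" := by
    rw [List.getD_eq_getElem?_getD, List.getElem?_eq_getElem hmem] at helse
    simpa using helse
  have hget2 : cmds[te]? = some "IF_ELSE" := by
    rw [List.getElem?_eq_getElem hmem, h2]
  have hdropte : cmds.drop te = "IF_ELSE" :: cmds.drop (te + 1) := by
    have h1 : cmds.drop te = cmds[te] :: cmds.drop (te + 1) :=
      List.drop_eq_getElem_cons hmem
    rw [h1, h2]
  show ∃ f ∈ ((PySem.List.enumerate cmds (0 : Int)).foldl mStep ([], PySem.Dict.empty)).1,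
    f.2.isSome = true
  rw [hsplit, List.foldl_append, hdropte, PySem.List.enumerate_cons, List.foldl_cons]
  -- name the machine state just before the else
  rcases hst : ((PySem.List.enumerate (cmds.take te) ((0 : Nat) : Int)).foldl mStep
      ([], PySem.Dict.empty)) with ⟨stk1, res1⟩
  rw [hst] at hok1
  simp only at hok1
  -- the stack is nonempty there
  cases stk1 with
  | nil =>
    exfalso
    rw [hok1.1] at hpos
    simp at hpos
  | cons g rest =>
    obtain ⟨a, b⟩ := g
    have hstep : mStep ((a, b) :: rest, res1) (((te : Nat) : Int), "IF_ELSE")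
        = ((a, some ((te : Nat) : Int)) :: rest, res1.insert a ((te : Nat), (te : Nat))) := by
      simp [mStep]
    rw [hstep]
    have hdepth : pvDepth cmds te = ((rest.length + 1 : Nat) : Int) := by
      rw [hok1.1]; simp
    have hok2 : StackOK cmds (te + 1)
        ((mStep ((a, b) :: rest, res1) (((te : Nat) : Int), "IF_ELSE")).1) :=
      stack_step cmds te "IF_ELSE" hget2 _ res1 hok1
    rw [hstep] at hok2
    have hcast : (((te : Nat) : Int) + 1) = (((te + 1 : Nat)) : Int) := by push_cast; ring
    rw [hcast]
    have hpf := persist_fold cmds (rest.length + 1) (cmds.drop (te + 1)) (te + 1) rfl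
      ((a, some ((te : Nat) : Int)) :: rest) (res1.insert a ((te : Nat), (te : Nat)))
      hok2 ⟨[], a, ((te : Nat) : Int), rest, rfl, rfl⟩
      (by
        intro k hk1 hk2
        rw [← hdepth]
        exact hnend k (by omega) hk2)
    obtain ⟨u, s0, e0, v, hstk, -⟩ := hpf
    exact ⟨(s0, some e0), by rw [hstk]; simp, rfl⟩

theorem dictify_le : ∀ (l : List (Int × Int × Int)) (d : PySem.Dict Int (Int × Int)),
    (l.foldl (fun d p => d.insert p.1 p.2) d).items.length ≤ d.items.length + l.length := by
  intro l
  induction l with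
  | nil => intro d; simp
  | cons p tl ih =>
    intro d
    rw [List.foldl_cons]
    calc ((tl.foldl (fun d p => d.insert p.1 p.2) (d.insert p.1 p.2)).items.length)
        ≤ (d.insert p.1 p.2).items.length + tl.length := ih _
      _ ≤ d.items.length + (p :: tl).length := by
          rw [PySem.Dict.items_insert]
          split <;> simp <;> omega

-- ===== VERDICT (by name: the statement is the Claim_ definition above) =====
theorem scan_for_if_blocks_spec : Claim_unchanged_scan_for_if_blocks := by
  intro cmds _
  unfold Spec_scan_for_if_blocks
  intro hD
  have hok : StackOK cmds cmds.length
      ((PySem.List.enumerate cmds (0 : Int)).foldl mStep ([], PySem.Dict.empty)).1 := by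
    have := stack_fold cmds cmds [] 0 (by simp) [] PySem.Dict.empty (stackOK_zero cmds)
    simpa using this
  have hall : ∀ f ∈ ((PySem.List.enumerate cmds (0 : Int)).foldl mStep
      ([], PySem.Dict.empty)).1, f.2 = none := by
    intro f hf
    cases hf2 : f.2 with
    | none => rfl
    | some e => exact absurd (dangling_of_frame cmds _ hok f hf e hf2) hD
  have htop := (top_sim cmds.length cmds (le_refl _) 0 [] PySem.Dict.empty
    (by simp [PySem.Dict.empty, PySem.Dict.items]) (by simp [PySem.Dict.keys, PySem.Dict.empty])
    (by simp [PySem.Dict.keys, PySem.Dict.empty])).1 hall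
  rw [A_eq_M]
  unfold scan_for_if_blocks_alt
  have hfresh := PySem.Dict.items_foldl_insert_fresh (l := topB [] 0 cmds)
    (k := fun p => p.1) (v := fun p => p.2)
    (d := (PySem.Dict.empty : PySem.Dict Int (Int × Int)))
    (by intro a _; simp [PySem.Dict.contains_empty])
    (by
      have : (topB [] 0 cmds).map Prod.fst =
          ((PySem.List.enumerate cmds (0 : Int)).foldl mStep ([], PySem.Dict.empty)).2.keys := by
        rw [← htop.1]; simp [PySem.Dict.keys]
      rw [show (fun p : Int × Int × Int => p.1) = Prod.fst from rfl, this]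
      exact htop.2)
  simp only [hfresh]
  rw [← htop.1]
  simp [PySem.Dict.empty, PySem.Dict.items]

theorem scan_for_if_blocks_tight : Claim_exact_scan_for_if_blocks := by
  intro cmds _ hD hEq
  have hcnt := (top_sim cmds.length cmds (le_refl _) 0 [] PySem.Dict.empty
    (by simp [PySem.Dict.empty, PySem.Dict.items]) (by simp [PySem.Dict.keys, PySem.Dict.empty])
    (by simp [PySem.Dict.keys, PySem.Dict.empty])).2
  obtain ⟨f, hf, hfs⟩ := some_frame_of_D cmds hD
  have hge1 : 1 ≤ (((PySem.List.enumerate cmds (0 : Int)).foldl mStep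
      ([], PySem.Dict.empty)).1.filter (fun f => f.2.isSome)).length := by
    have hmemf : f ∈ ((PySem.List.enumerate cmds (0 : Int)).foldl mStep
        ([], PySem.Dict.empty)).1.filter (fun f => f.2.isSome) :=
      List.mem_filter.mpr ⟨hf, hfs⟩
    have := List.ne_nil_of_mem hmemf
    have := List.length_pos_of_ne_nil this
    omega
  have hlenB : (scan_for_if_blocks_alt cmds).length ≤ (topB [] 0 cmds).length := by
    unfold scan_for_if_blocks_alt
    have := dictify_le (topB [] 0 cmds) PySem.Dict.empty
    simpa [PySem.Dict.empty, PySem.Dict.items] using this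
  have hlenA : (scan_for_if_blocks cmds).length
      = ((PySem.List.enumerate cmds (0 : Int)).foldl mStep ([], PySem.Dict.empty)).2.items.length := by
    rw [A_eq_M]
  have : (scan_for_if_blocks cmds).length ≠ (scan_for_if_blocks_alt cmds).length := by
    rw [hlenA, hcnt]
    omega
  exact this (by rw [hEq])

theorem scan_for_if_blocks_changed : Claim_changed_scan_for_if_blocks := by
  unfold Claim_changed_scan_for_if_blocks
  refine ⟨by decide, by decide, by decide, ?_, by decide⟩
  show scan_for_if_blocks_alt ["IF_START", "IF_ELSE"] = pvDiffWitnessOut_scan_for_if_blocks.2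
  unfold scan_for_if_blocks_alt
  rw [topB]
  simp only [String.reduceEq, reduceIte]
  rw [blockB]
  simp only [String.reduceEq, reduceIte]
  rw [blockB]
  simp [topB, PySem.Dict.empty, PySem.Dict.items, pvDiffWitnessOut_scan_for_if_blocks]
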